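-- pv_equiv track=rewrite | github.com/doctorwait/home | sandbox.py | sums_of_lines
-- ===== SOURCE A (Python) =====
-- def sums_of_lines(matrix: list, size: int, results=None):
--     """
--     Возвращает список из сумм: 1-й и 2-й элементы = суммы по диагоналям, далее N элементов суммы горизонталей, и N
--     элементов - по вертикали, где N = стороне квадрата.
--     """
--     if results is None:
--         results = [0]*(size * 2 + 2)
--     for i in range(size):
--         results[0] += matrix[i][i]
--         results[1] += matrix[i][-i - 1]
--         for j in range(size):
--             results[i + 2] += matrix[i][j]
--             results[-i - 1] += matrix[j][i]
--     return results
-- ===== SOURCE B (Python) =====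
-- def sums_of_lines(matrix: list, size: int, results=None):
--     if results is None:
--         results = [0] * (size * 2 + 2)
--     for i in range(size):
--         row = matrix[i]
--         results[0] += row[i]
--         results[1] += row[-i - 1]
--         results[i + 2] += sum(row[:size])
--     for i, col in enumerate(zip(*(matrix[i][:size] for i in range(size)))):
--         results[-i - 1] += sum(col)
--     return results
-- ===== Notes on version B (the rewrite author's own statement) =====
-- stated objective: alternative
-- what changed: A's single fused double loop does four element-wise in-place '+=' per matrix cell; B makes two separate directional passes: a row pass adding each diagonal element and a whole row-slice sum, then a column pass over the zip(*)-transpose adding each column sum into the reversed tail.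
import Mathlib
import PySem

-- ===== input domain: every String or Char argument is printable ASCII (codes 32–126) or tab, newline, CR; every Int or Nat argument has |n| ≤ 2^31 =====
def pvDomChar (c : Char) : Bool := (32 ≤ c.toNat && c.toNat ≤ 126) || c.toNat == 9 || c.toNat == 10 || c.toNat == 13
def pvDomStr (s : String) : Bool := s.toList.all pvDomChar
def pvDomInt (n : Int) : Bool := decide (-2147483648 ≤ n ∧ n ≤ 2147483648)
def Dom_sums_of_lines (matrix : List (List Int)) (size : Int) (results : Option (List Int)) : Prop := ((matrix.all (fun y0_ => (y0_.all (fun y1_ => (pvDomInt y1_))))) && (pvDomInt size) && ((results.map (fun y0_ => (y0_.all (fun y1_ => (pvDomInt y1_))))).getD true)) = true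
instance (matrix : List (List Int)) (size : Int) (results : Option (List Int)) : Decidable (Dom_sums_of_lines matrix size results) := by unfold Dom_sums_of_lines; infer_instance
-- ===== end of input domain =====

-- B replaces A's fused double loop (four in-place `+=` per matrix cell) by a row pass using
-- slice sums plus a separate column pass over the zip(*)-transpose; same return value, and the
-- same final state of a caller-supplied mutable `results` list.

-- shared language primitive: `r[idx] += v` with Python's negative-index rule
-- (exact where the index is in range; out of range Python raises IndexError — excluded by Pre_)
def pyIAdd (r : List Int) (idx : Int) (v : Int) : List Int :=
  let k := (if idx < 0 then idx + r.length else idx).toNat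
  r.set k (r.getD k 0 + v)

-- ===== PORT A =====
def sums_of_lines (matrix : List (List Int)) (size : Int) (results : Option (List Int)) : List Int :=
  let results0 := match results with
    | none => List.replicate (size * 2 + 2).toNat 0
    | some r => r
  (List.range size.toNat).foldl (fun (r : List Int) (i : Nat) =>
    let r := pyIAdd r 0 (PySem.List.pyGetD (PySem.List.pyGetD matrix (i : Int) []) (i : Int) 0)
    let r := pyIAdd r 1 (PySem.List.pyGetD (PySem.List.pyGetD matrix (i : Int) []) (-(i : Int) - 1) 0)
    (List.range size.toNat).foldl (fun (r : List Int) (j : Nat) =>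
      let r := pyIAdd r ((i : Int) + 2) (PySem.List.pyGetD (PySem.List.pyGetD matrix (i : Int) []) (j : Int) 0)
      pyIAdd r (-(i : Int) - 1) (PySem.List.pyGetD (PySem.List.pyGetD matrix (j : Int) []) (i : Int) 0)) r) results0

-- ===== PORT B =====
-- zip(*rows): one tuple per index below the minimum row length (exact for lists of ints)
def pyZipStar (rows : List (List Int)) : List (List Int) :=
  match rows with
  | [] => []
  | r :: rs =>
      let m := rs.foldl (fun m row => Nat.min m row.length) r.length
      (List.range m).map (fun j => (r :: rs).map (fun row => row.getD j 0))

def sums_of_lines_alt (matrix : List (List Int)) (size : Int) (results : Option (List Int)) : List Int :=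
  let results0 := match results with
    | none => List.replicate (size * 2 + 2).toNat 0
    | some r => r
  let results1 := (List.range size.toNat).foldl (fun (r : List Int) (i : Nat) =>
    let row := PySem.List.pyGetD matrix (i : Int) []
    let r := pyIAdd r 0 (PySem.List.pyGetD row (i : Int) 0)
    let r := pyIAdd r 1 (PySem.List.pyGetD row (-(i : Int) - 1) 0)
    pyIAdd r ((i : Int) + 2) (PySem.List.slice row none (some size)).sum) results0
  (PySem.List.enumerate (pyZipStar ((List.range size.toNat).map (fun (i : Nat) =>
      PySem.List.slice (PySem.List.pyGetD matrix (i : Int) []) none (some size)))) 0).foldl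
    (fun r ic => pyIAdd r (-ic.1 - 1) ic.2.sum) results1

-- ===== PRECONDITION & SPEC =====
-- Pre_ = exactly the inputs on which Python A returns (no IndexError): the first `size` rows
-- exist and are at least `size` long, and an explicitly supplied results buffer holds the
-- size*2+2 slots A indexes (length ≥ size+2 suffices for every index A touches).
def Pre_sums_of_lines (matrix : List (List Int)) (size : Int) (results : Option (List Int)) : Prop :=
  size ≤ (matrix.length : Int) ∧
  (∀ row ∈ matrix.take size.toNat, size ≤ (row.length : Int)) ∧
  (∀ r ∈ results.toList, 0 < size → size + 2 ≤ (r.length : Int))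
instance (matrix : List (List Int)) (size : Int) (results : Option (List Int)) : Decidable (Pre_sums_of_lines matrix size results) := by unfold Pre_sums_of_lines; infer_instance

def pvWitness_sums_of_lines : List (List Int) × Int × Option (List Int) := ([[1, 2], [3, 4]], 2, none)

def Spec_sums_of_lines (matrix : List (List Int)) (size : Int) (results : Option (List Int)) (out : List Int) : Prop := out = sums_of_lines_alt matrix size results
instance (matrix : List (List Int)) (size : Int) (results : Option (List Int)) (out : List Int) : Decidable (Spec_sums_of_lines matrix size results out) := by unfold Spec_sums_of_lines; infer_instance

-- ===== CLAIM (what is proved, stated in full; the proofs are below) =====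
def Claim_equal_sums_of_lines : Prop := ∀ (matrix : List (List Int)) (size : Int) (results : Option (List Int)), Dom_sums_of_lines matrix size results → Pre_sums_of_lines matrix size results → Spec_sums_of_lines matrix size results (sums_of_lines matrix size results)

-- ===== LEMMAS AND PROOFS =====

-- Nat-index form of pyIAdd, used only in proofs
def addNat (r : List Int) (k : Nat) (v : Int) : List Int := r.set k (r.getD k 0 + v)

theorem addNat_length (r : List Int) (k : Nat) (v : Int) : (addNat r k v).length = r.length := by
  simp [addNat]

theorem pyIAdd_eq_addNat (r : List Int) (p v : Int) :
    pyIAdd r p v = addNat r ((if p < 0 then p + r.length else p).toNat) v := rfl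

theorem addNat_comm (r : List Int) (k l : Nat) (a b : Int) :
    addNat (addNat r k a) l b = addNat (addNat r l b) k a := by
  unfold addNat
  by_cases hkl : k = l
  · subst hkl
    by_cases hk : k < r.length
    · simp [List.getD, hk, List.set_set]
      ring_nf
    · simp [List.set_eq_of_length_le (le_of_not_gt hk)]
  · have h1 : ∀ (x : Int), ((r.set k x).getD l 0) = r.getD l 0 := by
      intro x; simp [List.getD, List.getElem?_set_ne (by omega : k ≠ l)]
    have h2 : ∀ (x : Int), ((r.set l x).getD k 0) = r.getD k 0 := by
      intro x; simp [List.getD, List.getElem?_set_ne (by omega : l ≠ k)]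
    rw [h1, h2]; exact List.set_comm _ _ hkl
theorem addNat_merge (r : List Int) (k : Nat) (a b : Int) :
    addNat (addNat r k a) k b = addNat r k (a + b) := by
  unfold addNat
  by_cases hk : k < r.length
  · simp [List.getD, hk, List.set_set]; ring_nf
  · simp [List.set_eq_of_length_le (le_of_not_gt hk)]
theorem addNat_zero (r : List Int) (k : Nat) : addNat r k 0 = r := by
  unfold addNat
  by_cases hk : k < r.length
  · simp [List.getD, List.getElem?_eq_getElem hk, List.set_getElem_self]
  · simp [List.set_eq_of_length_le (le_of_not_gt hk)]

theorem pyIAdd_comm (r : List Int) (p q a b : Int) :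
    pyIAdd (pyIAdd r p a) q b = pyIAdd (pyIAdd r q b) p a := by
  simp only [pyIAdd_eq_addNat, addNat_length]
  exact addNat_comm r _ _ a b

theorem pyIAdd_merge (r : List Int) (p a b : Int) :
    pyIAdd (pyIAdd r p a) p b = pyIAdd r p (a + b) := by
  simp only [pyIAdd_eq_addNat, addNat_length]
  exact addNat_merge r _ a b

theorem pyIAdd_zero (r : List Int) (p : Int) : pyIAdd r p 0 = r := by
  rw [pyIAdd_eq_addNat]; exact addNat_zero r _

-- A's inner loop, interleaving two accumulation targets, equals two bulk additions
theorem innerA (n : Nat) (p q : Int) (f g : Nat → Int) (r : List Int) :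
    (List.range n).foldl (fun r j => pyIAdd (pyIAdd r p (f j)) q (g j)) r
      = pyIAdd (pyIAdd r p (((List.range n).map f).sum)) q (((List.range n).map g).sum) := by
  induction n generalizing r with
  | zero => simp [pyIAdd_zero]
  | succ n ih =>
      rw [List.range_succ, List.foldl_append, List.map_append, List.map_append]
      simp only [List.foldl_cons, List.foldl_nil, List.map_cons, List.map_nil, List.sum_append,
        List.sum_cons, List.sum_nil, add_zero]
      rw [ih]
      rw [pyIAdd_comm _ q p (List.map g (List.range n)).sum (f n), pyIAdd_merge, pyIAdd_merge]

theorem sum_getD_take (row : List Int) (n : Nat) :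
    ((List.range n).map (fun j => row.getD j 0)).sum = (row.take n).sum := by
  induction n with
  | zero => simp
  | succ n ih =>
      rw [List.range_succ, List.map_append, List.sum_append, ih]
      by_cases h : n < row.length
      · rw [List.sum_take_succ _ _ h]
        simp [List.getD, List.getElem?_eq_getElem h]
      · rw [List.take_of_length_le (by omega : row.length ≤ n), List.take_of_length_le (by omega : row.length ≤ n + 1)]
        simp [List.getD, List.getElem?_eq_none_iff.mpr (by omega : row.length ≤ n)]

-- B's first-loop body, as a named function (definitionally the lambda in sums_of_lines_alt)
def B1 (matrix : List (List Int)) (size : Int) (r : List Int) (i : Nat) : List Int :=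
  let row := PySem.List.pyGetD matrix (i : Int) []
  let r := pyIAdd r 0 (PySem.List.pyGetD row (i : Int) 0)
  let r := pyIAdd r 1 (PySem.List.pyGetD row (-(i : Int) - 1) 0)
  pyIAdd r ((i : Int) + 2) (PySem.List.slice row none (some size)).sum

theorem B1_pyIAdd (matrix : List (List Int)) (size : Int) (r : List Int) (i : Nat) (p a : Int) :
    B1 matrix size (pyIAdd r p a) i = pyIAdd (B1 matrix size r i) p a := by
  simp only [B1]
  rw [pyIAdd_comm r p 0 a _, pyIAdd_comm _ p 1 a _, pyIAdd_comm _ p _ a _]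

theorem foldl_B1_pyIAdd (matrix : List (List Int)) (size : Int) (l : List Nat) (r : List Int) (p a : Int) :
    l.foldl (B1 matrix size) (pyIAdd r p a) = pyIAdd (l.foldl (B1 matrix size) r) p a := by
  induction l generalizing r with
  | nil => rfl
  | cons x xs ih => simp only [List.foldl_cons, B1_pyIAdd]; exact ih _

-- splitting an interleaved fold into the B1 pass followed by the column pass
theorem foldl_split (matrix : List (List Int)) (size : Int) (q c : Nat → Int) (l : List Nat) (r : List Int) :
    l.foldl (fun r i => pyIAdd (B1 matrix size r i) (q i) (c i)) r
      = l.foldl (fun r i => pyIAdd r (q i) (c i)) (l.foldl (B1 matrix size) r) := by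
  induction l generalizing r with
  | nil => rfl
  | cons x xs ih =>
      simp only [List.foldl_cons]
      rw [ih, foldl_B1_pyIAdd]

theorem enumerate_map_range {α : Type} (f : Nat → α) (n : Nat) :
    PySem.List.enumerate ((List.range n).map f) 0 = (List.range n).map (fun k : Nat => ((k : Int), f k)) := by
  apply List.ext_getElem?
  intro k
  rw [PySem.List.getElem?_enumerate]
  by_cases h : k < n
  · simp [h]
  · simp [h]

theorem foldl_min_const (xs : List (List Int)) (N : Nat) (h : ∀ y ∈ xs, y.length = N) :
    xs.foldl (fun m row => Nat.min m row.length) N = N := by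
  induction xs with
  | nil => rfl
  | cons x xs ih =>
      simp only [List.foldl_cons, h x List.mem_cons_self, Nat.min_self]
      exact ih (fun y hy => h y (List.mem_cons_of_mem _ hy))

theorem pyZipStar_of_lengths (rows : List (List Int)) (N : Nat) (hne : rows ≠ [])
    (h : ∀ y ∈ rows, y.length = N) :
    pyZipStar rows = (List.range N).map (fun j => rows.map (fun row => row.getD j 0)) := by
  cases rows with
  | nil => exact absurd rfl hne
  | cons r rs =>
      show (List.range (rs.foldl (fun m row => Nat.min m row.length) r.length)).map _ = _
      rw [h r List.mem_cons_self]
      rw [foldl_min_const rs N (fun y hy => h y (List.mem_cons_of_mem _ hy))]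

theorem main_key (matrix : List (List Int)) (size : Int)
    (hm : size ≤ (matrix.length : Int))
    (hrows : ∀ row ∈ matrix.take size.toNat, size ≤ (row.length : Int))
    (r0 : List Int) :
    (List.range size.toNat).foldl (fun (r : List Int) (i : Nat) =>
      let r := pyIAdd r 0 (PySem.List.pyGetD (PySem.List.pyGetD matrix (i : Int) []) (i : Int) 0)
      let r := pyIAdd r 1 (PySem.List.pyGetD (PySem.List.pyGetD matrix (i : Int) []) (-(i : Int) - 1) 0)
      (List.range size.toNat).foldl (fun (r : List Int) (j : Nat) =>
        let r := pyIAdd r ((i : Int) + 2) (PySem.List.pyGetD (PySem.List.pyGetD matrix (i : Int) []) (j : Int) 0)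
        pyIAdd r (-(i : Int) - 1) (PySem.List.pyGetD (PySem.List.pyGetD matrix (j : Int) []) (i : Int) 0)) r) r0
    = (PySem.List.enumerate (pyZipStar ((List.range size.toNat).map (fun (i : Nat) =>
          PySem.List.slice (PySem.List.pyGetD matrix (i : Int) []) none (some size)))) 0).foldl
        (fun r ic => pyIAdd r (-ic.1 - 1) ic.2.sum)
        ((List.range size.toNat).foldl (B1 matrix size) r0) := by
  by_cases hN : size.toNat = 0
  · simp [hN, pyZipStar, PySem.List.enumerate_nil]
  · have hsz : 0 ≤ size := by omega
    have hmlen : size.toNat ≤ matrix.length := by omega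
    have hrowlen : ∀ i : Nat, i < size.toNat →
        size.toNat ≤ (PySem.List.pyGetD matrix (i : Int) []).length := by
      intro i hi
      have hget : PySem.List.pyGetD matrix (i : Int) [] = matrix.getD i [] := by
        simp [PySem.List.pyGetD_natCast]
      have hilt : i < matrix.length := by omega
      have hmem : matrix.getD i [] ∈ matrix.take size.toNat := by
        rw [List.getD_eq_getElem _ _ hilt]
        have : (matrix.take size.toNat)[i]'(by simp; omega) = matrix[i] := List.getElem_take
        rw [← this]
        exact List.getElem_mem _
      have := hrows _ hmem
      rw [hget]; omega
    -- the truncated rows fed to zip(*)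
    have hslice : ∀ i : Nat, i < size.toNat →
        PySem.List.slice (PySem.List.pyGetD matrix (i : Int) []) none (some size)
          = (PySem.List.pyGetD matrix (i : Int) []).take size.toNat := by
      intro i _; exact PySem.List.slice_to _ hsz
    -- step 1: rewrite A's body with innerA, identifying B1 plus one column addition
    have stepA : ∀ r0' : List Int, (List.range size.toNat).foldl (fun (r : List Int) (i : Nat) =>
        let r := pyIAdd r 0 (PySem.List.pyGetD (PySem.List.pyGetD matrix (i : Int) []) (i : Int) 0)
        let r := pyIAdd r 1 (PySem.List.pyGetD (PySem.List.pyGetD matrix (i : Int) []) (-(i : Int) - 1) 0)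
        (List.range size.toNat).foldl (fun (r : List Int) (j : Nat) =>
          let r := pyIAdd r ((i : Int) + 2) (PySem.List.pyGetD (PySem.List.pyGetD matrix (i : Int) []) (j : Int) 0)
          pyIAdd r (-(i : Int) - 1) (PySem.List.pyGetD (PySem.List.pyGetD matrix (j : Int) []) (i : Int) 0)) r) r0'
        = (List.range size.toNat).foldl (fun (r : List Int) (i : Nat) => pyIAdd (B1 matrix size r i) (-(i : Int) - 1)
            (((List.range size.toNat).map (fun (j : Nat) => PySem.List.pyGetD (PySem.List.pyGetD matrix (j : Int) []) (i : Int) 0)).sum)) r0' := by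
      intro r0'
      apply List.foldl_ext
      intro r i hi
      have hi' : i < size.toNat := List.mem_range.mp hi
      simp only []
      rw [innerA size.toNat ((i : Int) + 2) (-(i : Int) - 1)
        (fun (j : Nat) => PySem.List.pyGetD (PySem.List.pyGetD matrix (i : Int) []) (j : Int) 0)
        (fun (j : Nat) => PySem.List.pyGetD (PySem.List.pyGetD matrix (j : Int) []) (i : Int) 0)]
      simp only [B1, hslice i hi']
      congr 2
      calc ((List.range size.toNat).map (fun (j : Nat) => PySem.List.pyGetD (PySem.List.pyGetD matrix (i : Int) []) (j : Int) 0)).sum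
          = ((List.range size.toNat).map (fun (j : Nat) => (PySem.List.pyGetD matrix (i : Int) []).getD j 0)).sum := by
            simp [PySem.List.pyGetD_natCast]
        _ = ((PySem.List.pyGetD matrix (i : Int) []).take size.toNat).sum := sum_getD_take _ _
    rw [stepA, foldl_split]
    -- step 2: the column pass of B equals the column additions
    have hlens : ∀ y ∈ (List.range size.toNat).map (fun (i : Nat) =>
        PySem.List.slice (PySem.List.pyGetD matrix (i : Int) []) none (some size)), y.length = size.toNat := by
      intro y hy
      obtain ⟨i, hi, rfl⟩ := List.mem_map.mp hy
      have hi' : i < size.toNat := List.mem_range.mp hi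
      rw [hslice i hi', List.length_take]
      have := hrowlen i hi'
      omega
    have hne : (List.range size.toNat).map (fun (i : Nat) =>
        PySem.List.slice (PySem.List.pyGetD matrix (i : Int) []) none (some size)) ≠ [] := by
      simp [List.map_eq_nil_iff, List.range_eq_nil]
      omega
    rw [pyZipStar_of_lengths _ size.toNat hne hlens, enumerate_map_range, List.foldl_map]
    apply List.foldl_ext
    intro r k hk
    have hk' : k < size.toNat := List.mem_range.mp hk
    congr 1
    rw [List.map_map]
    congr 1
    apply List.map_congr_left
    intro j hj
    have hj' : j < size.toNat := List.mem_range.mp hj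
    simp only [Function.comp]
    rw [hslice j hj']
    rw [PySem.List.pyGetD_natCast]
    simp only [List.getD]
    rw [List.getElem?_take_of_lt hk']

-- ===== VERDICT (by name: the statement is the Claim_ definition above) =====
theorem sums_of_lines_spec : Claim_equal_sums_of_lines := by
  intro matrix size results _hdom hpre
  obtain ⟨hm, hrows, _hres⟩ := hpre
  unfold Spec_sums_of_lines sums_of_lines sums_of_lines_alt
  cases results with
  | none => exact main_key matrix size hm hrows _
  | some r => exact main_key matrix size hm hrows _
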